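-- pv_equiv track=rewrite | github.com/coderIsad/Singh_Jaideep21911303_ISErepo | color_analysis.py | get_color_from_frequency
-- ===== SOURCE A (Python) =====
-- VISIBLE_LIGHT_MIN = 400  # THz
--
-- VISIBLE_LIGHT_MAX = 790  # THz
--
-- VALID_FREQ_MIN = 1  # THz
--
-- VALID_FREQ_MAX = 40000  # THz
--
-- COLOR_RANGES = {
--     "Red": (400, 484),
--     "Orange": (484, 508),
--     "Yellow": (508, 526),
--     "Green": (526, 606),
--     "Blue": (606, 668),
--     "Indigo": (668, 689),
--     "Violet": (689, 790)
-- }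
--
-- def is_valid_frequency(frequency):
--     """
--     Check if a frequency is within the valid range.
--
--     Args:
--         frequency (int): Frequency in THz
--
--     Returns:
--         bool: True if frequency is valid, False otherwise
--     """
--     return VALID_FREQ_MIN <= frequency <= VALID_FREQ_MAX
--
-- def is_visible_light(frequency):
--     """
--     Check if a frequency is within the visible light range.
--
--     Args:
--         frequency (int): Frequency in THz
--
--     Returns:
--         bool: True if frequency is in visible light range, False otherwise
--     """
--     return VISIBLE_LIGHT_MIN <= frequency <= VISIBLE_LIGHT_MAX
--
-- def get_color_from_frequency(frequency):
--     """
--     Get the color name from a frequency.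
--
--     Args:
--         frequency (int): Frequency in THz
--
--     Returns:
--         str: Color name or appropriate message
--     """
--     if not is_valid_frequency(frequency):
--         return "Invalid frequency. Please enter a frequency between 1 and 40000 THz."
--
--     if not is_visible_light(frequency):
--         if frequency < VISIBLE_LIGHT_MIN:
--             return "This frequency is lower than that of red light and not in the visible spectrum."
--         else:
--             return "This frequency is higher than that of violet light and not in the visible spectrum."
--
--     for color, (lower, upper) in COLOR_RANGES.items():
--         if lower <= frequency <= upper:
--             return color
--
--     return "No specific color found for this frequency."
-- ===== SOURCE B (Python) =====
-- import bisect
--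
-- VISIBLE_LIGHT_MIN = 400  # THz
-- VISIBLE_LIGHT_MAX = 790  # THz
-- VALID_FREQ_MIN = 1  # THz
-- VALID_FREQ_MAX = 40000  # THz
--
-- COLOR_RANGES = {
--     "Red": (400, 484),
--     "Orange": (484, 508),
--     "Yellow": (508, 526),
--     "Green": (526, 606),
--     "Blue": (606, 668),
--     "Indigo": (668, 689),
--     "Violet": (689, 790)
-- }
--
-- _NAMES = list(COLOR_RANGES)
-- _UPPERS = [hi for (_, hi) in COLOR_RANGES.values()]
--
-- def is_valid_frequency(frequency):
--     return VALID_FREQ_MIN <= frequency <= VALID_FREQ_MAX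
--
-- def is_visible_light(frequency):
--     return VISIBLE_LIGHT_MIN <= frequency <= VISIBLE_LIGHT_MAX
--
-- def get_color_from_frequency(frequency):
--     if not is_valid_frequency(frequency):
--         return "Invalid frequency. Please enter a frequency between 1 and 40000 THz."
--     if not is_visible_light(frequency):
--         if frequency < VISIBLE_LIGHT_MIN:
--             return "This frequency is lower than that of red light and not in the visible spectrum."
--         else:
--             return "This frequency is higher than that of violet light and not in the visible spectrum."
--     idx = bisect.bisect_left(_UPPERS, frequency)
--     if idx < len(_NAMES):
--         return _NAMES[idx]
--     return "No specific color found for this frequency."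
-- ===== Notes on version B (the rewrite author's own statement) =====
-- stated objective: idiomatic
-- what changed: Replaces A's linear first-match scan over the COLOR_RANGES dict with a bisect_left binary search over the ordered list of band upper bounds, indexing a parallel list of names.
import Mathlib
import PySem

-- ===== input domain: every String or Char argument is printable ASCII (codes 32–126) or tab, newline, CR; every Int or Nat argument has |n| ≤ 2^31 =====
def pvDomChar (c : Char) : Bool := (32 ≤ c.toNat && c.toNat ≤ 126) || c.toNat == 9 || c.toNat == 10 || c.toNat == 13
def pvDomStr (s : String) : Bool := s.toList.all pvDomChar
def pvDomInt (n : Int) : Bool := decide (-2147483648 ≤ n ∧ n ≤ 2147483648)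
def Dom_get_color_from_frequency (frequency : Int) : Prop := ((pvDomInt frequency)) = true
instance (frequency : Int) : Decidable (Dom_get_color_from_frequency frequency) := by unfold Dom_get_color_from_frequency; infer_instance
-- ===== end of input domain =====

set_option maxRecDepth 4000


-- B replaces A's linear first-match scan over the colour bands by a binary search
-- (bisect_left) over the ordered upper bounds; objective: idiomatic (no speed claim).

-- ===== PORT A =====
-- COLOR_RANGES as an insertion-ordered association list (Python dict iteration order)
def colorRanges : List (String × (Int × Int)) :=
  [("Red", (400, 484)), ("Orange", (484, 508)), ("Yellow", (508, 526)),
   ("Green", (526, 606)), ("Blue", (606, 668)), ("Indigo", (668, 689)),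
   ("Violet", (689, 790))]

def is_valid_frequency (frequency : Int) : Bool :=
  decide (1 ≤ frequency ∧ frequency ≤ 40000)

def is_visible_light (frequency : Int) : Bool :=
  decide (400 ≤ frequency ∧ frequency ≤ 790)

-- A's `for color, (lower, upper) in COLOR_RANGES.items(): if lower <= f <= upper: return color`
def colorLoop (frequency : Int) : List (String × (Int × Int)) → String
  | [] => "No specific color found for this frequency."
  | (color, (lower, upper)) :: rest =>
      if lower ≤ frequency ∧ frequency ≤ upper then color
      else colorLoop frequency rest

def get_color_from_frequency (frequency : Int) : String :=
  if ¬ is_valid_frequency frequency then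
    "Invalid frequency. Please enter a frequency between 1 and 40000 THz."
  else if ¬ is_visible_light frequency then
    if frequency < 400 then
      "This frequency is lower than that of red light and not in the visible spectrum."
    else
      "This frequency is higher than that of violet light and not in the visible spectrum."
  else
    colorLoop frequency colorRanges

-- ===== PORT B =====
def uppersB : List Int := [484, 508, 526, 606, 668, 689, 790]

def namesB : List String :=
  ["Red", "Orange", "Yellow", "Green", "Blue", "Indigo", "Violet"]

-- transliteration of Python's bisect.bisect_left binary-search loop
-- (fuel = hi - lo bounds the iterations; each step strictly shrinks the range)
def bisectLeftGo (xs : List Int) (x : Int) : Nat → Nat → Nat → Nat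
  | 0, lo, _ => lo
  | fuel + 1, lo, hi =>
    if lo < hi then
      let mid := (lo + hi) / 2
      if xs.getD mid 0 < x then bisectLeftGo xs x fuel (mid + 1) hi
      else bisectLeftGo xs x fuel lo mid
    else lo

def bisectLeft (xs : List Int) (x : Int) (lo hi : Nat) : Nat :=
  bisectLeftGo xs x (hi - lo) lo hi

def get_color_from_frequency_alt (frequency : Int) : String :=
  if ¬ (1 ≤ frequency ∧ frequency ≤ 40000) then
    "Invalid frequency. Please enter a frequency between 1 and 40000 THz."
  else if ¬ (400 ≤ frequency ∧ frequency ≤ 790) then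
    if frequency < 400 then
      "This frequency is lower than that of red light and not in the visible spectrum."
    else
      "This frequency is higher than that of violet light and not in the visible spectrum."
  else
    let idx := bisectLeft uppersB frequency 0 uppersB.length
    if _ : idx < namesB.length then namesB.getD idx ""
    else "No specific color found for this frequency."

-- ===== PRECONDITION & SPEC =====
def Spec_get_color_from_frequency (frequency : Int) (out : String) : Prop := out = get_color_from_frequency_alt frequency
instance (frequency : Int) (out : String) : Decidable (Spec_get_color_from_frequency frequency out) := by unfold Spec_get_color_from_frequency; infer_instance

-- ===== CLAIM (what is proved, stated in full; the proofs are below) =====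
def Claim_equal_get_color_from_frequency : Prop := ∀ (frequency : Int), Dom_get_color_from_frequency frequency → Spec_get_color_from_frequency frequency (get_color_from_frequency frequency)

-- ===== LEMMAS AND PROOFS =====

-- On the visible band the two lookups agree (checked value by value).
theorem visible_agrees_range :
    ∀ n ∈ List.range 391,
      get_color_from_frequency (400 + (n : Int)) =
        get_color_from_frequency_alt (400 + (n : Int)) := by
  decide

theorem visible_agrees (f : Int) (h1 : 400 ≤ f) (h2 : f ≤ 790) :
    get_color_from_frequency f = get_color_from_frequency_alt f := by
  have hn : ∃ n : Nat, n < 391 ∧ f = 400 + (n : Int) := ⟨(f - 400).toNat, by omega, by omega⟩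
  obtain ⟨n, hn1, rfl⟩ := hn
  exact visible_agrees_range n (List.mem_range.mpr hn1)

theorem get_color_eq (f : Int) :
    get_color_from_frequency f = get_color_from_frequency_alt f := by
  by_cases hv : 1 ≤ f ∧ f ≤ 40000
  · by_cases hvis : 400 ≤ f ∧ f ≤ 790
    · exact visible_agrees f hvis.1 hvis.2
    · simp [get_color_from_frequency, get_color_from_frequency_alt,
        is_valid_frequency, is_visible_light, hv, hvis]
  · simp [get_color_from_frequency, get_color_from_frequency_alt,
      is_valid_frequency, hv]

-- ===== VERDICT (by name: the statement is the Claim_ definition above) =====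
theorem get_color_from_frequency_spec : Claim_equal_get_color_from_frequency := by
  intro f _
  exact get_color_eq f
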